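-- pv_equiv track=rewrite | github.com/erikiva/advent-of-code | 2018/day02/inventory.py | solve
-- ===== SOURCE A (Python) =====
-- from collections import Counter
--
-- def solve(data):
--     twice = 0
--     thrice = 0
--     for code in data:
--         code_stats = Counter(code).values()
--         if 2 in code_stats:
--             twice += 1
--         if 3 in code_stats:
--             thrice += 1
--     return twice * thrice
-- ===== SOURCE B (Python) =====
-- def run_lengths(s):
--     # s is a sorted list of characters; return the lengths of its runs of equal chars
--     if not s:
--         return []
--     c = s[0]
--     k = 1
--     while k < len(s) and s[k] == c:
--         k += 1
--     return [k] + run_lengths(s[k:])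
--
-- def solve(data):
--     twice = 0
--     thrice = 0
--     for code in data:
--         lengths = run_lengths(sorted(code))
--         if 2 in lengths:
--             twice += 1
--         if 3 in lengths:
--             thrice += 1
--     return twice * thrice
-- ===== Notes on version B (the rewrite author's own statement) =====
-- stated objective: alternative
-- what changed: Per code, B sorts the characters and scans the runs of equal characters for a run of length 2/3, instead of A's Counter hash-table frequency map and a membership test on its values.
import Mathlib
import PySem

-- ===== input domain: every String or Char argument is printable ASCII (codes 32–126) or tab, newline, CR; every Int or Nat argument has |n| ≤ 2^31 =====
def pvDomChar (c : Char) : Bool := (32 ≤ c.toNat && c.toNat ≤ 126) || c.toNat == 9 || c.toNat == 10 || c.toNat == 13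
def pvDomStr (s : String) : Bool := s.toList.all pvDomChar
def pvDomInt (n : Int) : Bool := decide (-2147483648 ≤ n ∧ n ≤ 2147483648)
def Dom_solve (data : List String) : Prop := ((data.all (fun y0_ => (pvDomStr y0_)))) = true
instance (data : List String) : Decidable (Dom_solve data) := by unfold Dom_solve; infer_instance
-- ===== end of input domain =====

-- B replaces A's Counter-based frequency map by a sort-then-scan over runs of equal characters (alternative, same result).

-- ===== PORT A =====
def solve (data : List String) : Int :=
  let p := data.foldl (fun (acc : Int × Int) code =>
    let code_stats := (PySem.Dict.counter code.toList).values
    ((if (2 : Int) ∈ code_stats then acc.1 + 1 else acc.1),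
     (if (3 : Int) ∈ code_stats then acc.2 + 1 else acc.2))) (0, 0)
  p.1 * p.2

-- ===== PORT B =====
-- run_lengths: lengths of maximal runs of equal characters (the while loop advancing k is the takeWhile)
def runLengths : List Char → List Nat
  | [] => []
  | c :: t =>
      (1 + (t.takeWhile (· == c)).length) :: runLengths (t.dropWhile (· == c))
  termination_by l => l.length
  decreasing_by
    simp only [List.length_cons]
    exact Nat.lt_succ_of_le (List.length_dropWhile_le _ _)

def solve_alt (data : List String) : Int :=
  let p := data.foldl (fun (acc : Int × Int) code =>
    let lengths := runLengths (PySem.List.sorted code.toList (fun c => c) false)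
    ((if 2 ∈ lengths then acc.1 + 1 else acc.1),
     (if 3 ∈ lengths then acc.2 + 1 else acc.2))) (0, 0)
  p.1 * p.2

-- ===== PRECONDITION & SPEC =====
def Spec_solve (data : List String) (out : Int) : Prop := out = solve_alt data
instance (data : List String) (out : Int) : Decidable (Spec_solve data out) := by unfold Spec_solve; infer_instance

-- ===== CLAIM (what is proved, stated in full; the proofs are below) =====
def Claim_equal_solve : Prop := ∀ (data : List String), Dom_solve data → Spec_solve data (solve data)

-- ===== LEMMAS AND PROOFS =====

-- On a list sorted in nondecreasing order, the run lengths are exactly the counts of the members.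
lemma mem_runLengths_sorted (s : List Char) (hs : s.Pairwise (· ≤ ·)) (k : Nat) :
    k ∈ runLengths s ↔ ∃ c ∈ s, s.count c = k := by
  induction s using runLengths.induct with
  | case1 => simp [runLengths]
  | case2 c t ih =>
    rw [List.pairwise_cons] at hs
    obtain ⟨hle, hpt⟩ := hs
    have hsplit : t = t.takeWhile (· == c) ++ t.dropWhile (· == c) :=
      (List.takeWhile_append_dropWhile).symm
    have htake : ∀ x ∈ t.takeWhile (· == c), x = c := by
      intro x hx
      simpa using List.mem_takeWhile_imp hx
    have hdrop_ne : ∀ x ∈ t.dropWhile (· == c), x ≠ c := by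
      intro x hx
      cases hd : t.dropWhile (· == c) with
      | nil => rw [hd] at hx; simp at hx
      | cons y ys =>
        have hy : ¬ (y == c) = true := by
          have h0 := List.head?_dropWhile_not (p := (· == c)) (l := t)
          rw [hd] at h0
          simpa using h0
        have hyc : y ≠ c := by simpa using hy
        rw [hd] at hx
        rcases List.mem_cons.mp hx with rfl | hx2
        · exact hyc
        · have hpt' : (t.dropWhile (· == c)).Pairwise (· ≤ ·) := by
            rw [hsplit] at hpt
            exact (List.pairwise_append.mp hpt).2.1
          rw [hd, List.pairwise_cons] at hpt'
          have hyx : y ≤ x := hpt'.1 x hx2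
          have hcy : c ≤ y := hle y (by rw [hsplit, hd]; simp)
          exact fun hxc => hyc (le_antisymm (hxc ▸ hyx) hcy)
    have hcount_c : (c :: t).count c = 1 + (t.takeWhile (· == c)).length := by
      have h1 : (t.takeWhile (· == c)).count c = (t.takeWhile (· == c)).length :=
        List.count_eq_length.mpr (fun x hx => ((htake x hx) ▸ rfl : c = x))
      have h2 : (t.dropWhile (· == c)).count c = 0 :=
        List.count_eq_zero.mpr (fun hx => hdrop_ne c hx rfl)
      have : (c :: t).count c = t.count c + 1 := by simp
      conv_lhs => rw [this, hsplit]
      rw [List.count_append, h1, h2]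
      omega
    have hcount_ne : ∀ d, d ≠ c → (c :: t).count d = (t.dropWhile (· == c)).count d := by
      intro d hd
      have h0 : (c :: t).count d = t.count d := by
        simp [Ne.symm hd]
      have h1 : (t.takeWhile (· == c)).count d = 0 :=
        List.count_eq_zero.mpr (fun hx => hd (htake d hx))
      rw [h0]
      conv_lhs => rw [hsplit]
      rw [List.count_append, h1]
      omega
    have hdsorted : (t.dropWhile (· == c)).Pairwise (· ≤ ·) := by
      rw [hsplit] at hpt
      exact (List.pairwise_append.mp hpt).2.1
    have ihd := ih hdsorted
    rw [runLengths]
    simp only [List.mem_cons]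
    constructor
    · rintro (rfl | hk)
      · exact ⟨c, Or.inl rfl, hcount_c⟩
      · obtain ⟨d, hdm, hdc⟩ := ihd.mp hk
        have hdnec : d ≠ c := hdrop_ne d hdm
        refine ⟨d, Or.inr ?_, ?_⟩
        · rw [hsplit]; exact List.mem_append_right _ hdm
        · rw [hcount_ne d hdnec]; exact hdc
    · rintro ⟨d, hdm, hdc⟩
      by_cases hdc' : d = c
      · subst hdc'; left; rw [← hdc, hcount_c]
      · right
        refine ihd.mpr ⟨d, ?_, ?_⟩
        · rcases hdm with h | h
          · exact absurd h hdc'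
          · rw [hsplit] at h
            rcases List.mem_append.mp h with h | h
            · exact absurd (htake d h) hdc'
            · exact h
        · rw [← hcount_ne d hdc']; exact hdc

-- Per code: membership of k in the Counter's values equals membership of k in the sorted-run lengths.
lemma counter_values_iff_runLengths (xs : List Char) (k : Nat) :
    ((k : Int) ∈ (PySem.Dict.counter xs).values) ↔
      k ∈ runLengths (PySem.List.sorted xs (fun c => c) false) := by
  have hvals : (PySem.Dict.counter xs).values
      = ((PySem.Dict.counter xs).items).map Prod.snd := rfl
  rw [hvals, PySem.Dict.items_counter, List.map_map]
  have hperm : (PySem.List.sorted xs (fun c => c) false).Perm xs :=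
    PySem.List.sorted_perm xs _ false
  have hsorted : (PySem.List.sorted xs (fun c => c) false).Pairwise (· ≤ ·) := by
    have h0 := PySem.List.sorted_pairwise xs (fun c => c) (κ := Char)
    simpa using h0
  rw [mem_runLengths_sorted _ hsorted k]
  simp only [List.mem_map, Function.comp]
  constructor
  · rintro ⟨c, hc, hck⟩
    have hck' : xs.count c = k := by exact_mod_cast hck
    refine ⟨c, ?_, ?_⟩
    · exact hperm.mem_iff.mpr ((PySem.Set.mem_ofList _ _).mp hc)
    · rw [hperm.count_eq]; exact hck'
  · rintro ⟨c, hc, hck⟩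
    refine ⟨c, (PySem.Set.mem_ofList _ _).mpr (hperm.mem_iff.mp hc), ?_⟩
    rw [← hperm.count_eq, hck]

lemma step_eq : ∀ (acc : Int × Int) (code : String),
    (fun (acc : Int × Int) code =>
      let code_stats := (PySem.Dict.counter code.toList).values
      ((if (2 : Int) ∈ code_stats then acc.1 + 1 else acc.1),
       (if (3 : Int) ∈ code_stats then acc.2 + 1 else acc.2))) acc code
    = (fun (acc : Int × Int) code =>
      let lengths := runLengths (PySem.List.sorted code.toList (fun c => c) false)
      ((if 2 ∈ lengths then acc.1 + 1 else acc.1),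
       (if 3 ∈ lengths then acc.2 + 1 else acc.2))) acc code := by
  intro acc code
  have h2 : ((2 : Int) ∈ (PySem.Dict.counter code.toList).values) ↔
      2 ∈ runLengths (PySem.List.sorted code.toList (fun c => c) false) := by
    have h0 := counter_values_iff_runLengths code.toList 2
    simpa using h0
  have h3 : ((3 : Int) ∈ (PySem.Dict.counter code.toList).values) ↔
      3 ∈ runLengths (PySem.List.sorted code.toList (fun c => c) false) := by
    have h0 := counter_values_iff_runLengths code.toList 3
    simpa using h0
  simp only
  rw [if_congr h2 rfl rfl, if_congr h3 rfl rfl]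

-- ===== VERDICT (by name: the statement is the Claim_ definition above) =====
theorem solve_spec : Claim_equal_solve := by
  intro data _
  unfold Spec_solve solve solve_alt
  have hf : (fun (acc : Int × Int) (code : String) =>
      let code_stats := (PySem.Dict.counter code.toList).values
      ((if (2 : Int) ∈ code_stats then acc.1 + 1 else acc.1),
       (if (3 : Int) ∈ code_stats then acc.2 + 1 else acc.2)))
    = (fun (acc : Int × Int) code =>
      let lengths := runLengths (PySem.List.sorted code.toList (fun c => c) false)
      ((if 2 ∈ lengths then acc.1 + 1 else acc.1),
       (if 3 ∈ lengths then acc.2 + 1 else acc.2))) :=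
    funext fun acc => funext fun code => step_eq acc code
  rw [hf]
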